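-- pv_equiv track=rewrite | github.com/mvarrone/stp-project | backend/graph/code.py | obtain_some_values_from_version_command
-- ===== SOURCE A (Python) =====
-- def obtain_some_values_from_version_command(parsed_version_output, device_type):
--     if device_type == "cisco_ios":
--         # Initialize default values
--         version = ''
--         serial = ''
--         uptime = ''
--
--         # Process parsed_version_output
--         for entry in parsed_version_output:
--             if 'version' in entry:
--                 version = entry['version']
--             if 'serial' in entry:
--                 serial = entry['serial']
--             if 'uptime' in entry:
--                 uptime = entry['uptime']
--
--         return version, serial, uptime
-- ===== SOURCE B (Python) =====
-- def obtain_some_values_from_version_command(parsed_version_output, device_type):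
--     if device_type != "cisco_ios":
--         return None
--
--     def last_value(key):
--         # scan back-to-front: the last entry carrying the key wins
--         for entry in reversed(parsed_version_output):
--             if key in entry:
--                 return entry[key]
--         return ''
--
--     return last_value('version'), last_value('serial'), last_value('uptime')
-- ===== Notes on version B (the rewrite author's own statement) =====
-- stated objective: alternative
-- what changed: Instead of one forward pass updating three scalar accumulators under membership tests, B scans the entry list back-to-front once per field and returns the first hit (the last occurrence), with an early return and no accumulators.
import Mathlib
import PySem

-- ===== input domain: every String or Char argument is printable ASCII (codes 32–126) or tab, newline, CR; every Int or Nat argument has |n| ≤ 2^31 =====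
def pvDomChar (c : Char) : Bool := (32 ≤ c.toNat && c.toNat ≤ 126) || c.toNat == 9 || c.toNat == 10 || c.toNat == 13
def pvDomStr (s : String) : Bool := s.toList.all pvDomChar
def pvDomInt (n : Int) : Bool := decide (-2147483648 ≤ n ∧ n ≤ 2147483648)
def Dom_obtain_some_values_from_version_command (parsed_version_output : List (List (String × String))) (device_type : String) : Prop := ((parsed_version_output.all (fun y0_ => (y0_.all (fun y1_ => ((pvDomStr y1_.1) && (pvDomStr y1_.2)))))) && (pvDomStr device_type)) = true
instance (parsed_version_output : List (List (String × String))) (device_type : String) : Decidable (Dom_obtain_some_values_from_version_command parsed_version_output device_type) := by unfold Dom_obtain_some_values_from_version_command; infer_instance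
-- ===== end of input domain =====

-- B replaces A's forward pass with three scalar accumulators by a back-to-front scan per field
-- (first hit from the end = last occurrence); objective: alternative decomposition, same cost.


-- ===== PORT A =====
-- each Python entry is a dict; the assoc list is turned into a PySem.Dict for 'in' / [] lookups
def pvStepA (st : String × String × String) (e : List (String × String)) : String × String × String :=
  let d := PySem.Dict.ofList e
  let version := match d.get? "version" with | some x => x | none => st.1
  let serial  := match d.get? "serial"  with | some x => x | none => st.2.1
  let uptime  := match d.get? "uptime"  with | some x => x | none => st.2.2
  (version, serial, uptime)

def obtain_some_values_from_version_command (parsed_version_output : List (List (String × String))) (device_type : String) : Option (String × String × String) :=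
  if device_type == "cisco_ios" then
    some (parsed_version_output.foldl pvStepA ("", "", ""))
  else none

-- ===== PORT B =====
-- 'for entry in reversed(...): if key in entry: return entry[key]' / 'return ""'
def pvLastVal (key : String) : List (List (String × String)) → String
  | [] => ""
  | e :: rest =>
    match (PySem.Dict.ofList e).get? key with
    | some v => v
    | none => pvLastVal key rest

def obtain_some_values_from_version_command_alt (parsed_version_output : List (List (String × String))) (device_type : String) : Option (String × String × String) :=
  if device_type != "cisco_ios" then none
  else
    some (pvLastVal "version" parsed_version_output.reverse,
          pvLastVal "serial" parsed_version_output.reverse,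
          pvLastVal "uptime" parsed_version_output.reverse)

-- ===== PRECONDITION & SPEC =====
def Spec_obtain_some_values_from_version_command (parsed_version_output : List (List (String × String))) (device_type : String) (out : Option (String × String × String)) : Prop := out = obtain_some_values_from_version_command_alt parsed_version_output device_type
instance (parsed_version_output : List (List (String × String))) (device_type : String) (out : Option (String × String × String)) : Decidable (Spec_obtain_some_values_from_version_command parsed_version_output device_type out) := by unfold Spec_obtain_some_values_from_version_command; infer_instance

-- ===== CLAIM (what is proved, stated in full; the proofs are below) =====
def Claim_equal_obtain_some_values_from_version_command : Prop := ∀ (parsed_version_output : List (List (String × String))) (device_type : String), Dom_obtain_some_values_from_version_command parsed_version_output device_type → Spec_obtain_some_values_from_version_command parsed_version_output device_type (obtain_some_values_from_version_command parsed_version_output device_type)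

-- ===== LEMMAS AND PROOFS =====
-- pvLastVal with an arbitrary default, for the fold invariant
def pvLastValD (key d : String) : List (List (String × String)) → String
  | [] => d
  | e :: rest =>
    match (PySem.Dict.ofList e).get? key with
    | some v => v
    | none => pvLastValD key d rest

lemma pvLastValD_empty (key : String) (l : List (List (String × String))) :
    pvLastValD key "" l = pvLastVal key l := by
  induction l with
  | nil => rfl
  | cons e rest ih =>
    simp only [pvLastValD, pvLastVal]
    cases (PySem.Dict.ofList e).get? key <;> simp [ih]

lemma pvLastValD_append (key d : String) (xs : List (List (String × String)))
    (e : List (String × String)) :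
    pvLastValD key d (xs ++ [e]) =
      pvLastValD key (match (PySem.Dict.ofList e).get? key with | some x => x | none => d) xs := by
  induction xs with
  | nil =>
    simp only [List.nil_append, pvLastValD]
  | cons y ys ih =>
    simp only [List.cons_append, pvLastValD]
    cases (PySem.Dict.ofList y).get? key <;> simp [ih]

lemma foldl_pvStepA (l : List (List (String × String))) :
    ∀ v s u, l.foldl pvStepA (v, s, u) =
      (pvLastValD "version" v l.reverse, pvLastValD "serial" s l.reverse,
       pvLastValD "uptime" u l.reverse) := by
  induction l with
  | nil => intro v s u; rfl
  | cons e rest ih =>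
    intro v s u
    simp only [List.foldl_cons, List.reverse_cons, pvStepA, ih, pvLastValD_append]

theorem obtain_some_values_from_version_command_spec : Claim_equal_obtain_some_values_from_version_command := by
  intro l dt _
  unfold Spec_obtain_some_values_from_version_command
  unfold obtain_some_values_from_version_command obtain_some_values_from_version_command_alt
  by_cases h : dt = "cisco_ios"
  · subst h
    simp [foldl_pvStepA, pvLastValD_empty]
  · simp [h]
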